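-- pv_equiv track=rewrite | github.com/ryandmaggio/seance | seance_api.py | get_jump_regions
-- ===== SOURCE A (Python) =====
-- def get_jump_regions(jumps):
--     regions = []
--     l_bound = jumps[0]
--     limit = 0x200
--     for i in range(0, len(jumps)):
--         if(i+1 == len(jumps)):
--             regions.append([l_bound, jumps[i]])
--         elif jumps[i+1] - jumps[i] > limit:
--             regions.append([l_bound, jumps[i]])
--             l_bound = jumps[i+1]
--     return regions
-- ===== SOURCE B (Python) =====
-- def get_jump_regions(jumps):
--     breaks = [i for i in range(len(jumps) - 1) if jumps[i + 1] - jumps[i] > 0x200]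
--     starts = [0] + [i + 1 for i in breaks]
--     ends = breaks + [len(jumps) - 1]
--     return [[jumps[s], jumps[e]] for s, e in zip(starts, ends)]
-- ===== Notes on version B (the rewrite author's own statement) =====
-- stated objective: alternative
-- what changed: Replaces A's sequential accumulator pass (tracking l_bound while scanning) with index arithmetic: first compute the list of break positions (indices with gap > 0x200), then derive the region start/end index lists from it and map index pairs to [jumps[s], jumps[e]].
import Mathlib
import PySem

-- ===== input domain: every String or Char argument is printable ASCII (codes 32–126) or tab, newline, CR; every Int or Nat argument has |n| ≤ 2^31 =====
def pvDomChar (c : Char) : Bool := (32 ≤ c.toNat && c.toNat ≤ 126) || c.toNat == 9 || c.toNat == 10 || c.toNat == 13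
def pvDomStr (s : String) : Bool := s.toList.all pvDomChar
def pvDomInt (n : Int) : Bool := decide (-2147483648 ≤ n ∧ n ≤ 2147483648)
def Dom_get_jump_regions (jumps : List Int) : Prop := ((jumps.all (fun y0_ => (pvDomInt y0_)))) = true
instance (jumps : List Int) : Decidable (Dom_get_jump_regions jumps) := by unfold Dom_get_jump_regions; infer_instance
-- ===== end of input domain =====

-- B replaces A's sequential l_bound-tracking pass by index arithmetic: compute the break
-- positions first, derive start/end index lists from them, then map index pairs to regions.

-- ===== PORT A =====
-- step of A's for-loop over i in range(0, len(jumps)); state = (regions, l_bound)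
def pvStepA (jumps : List Int) (st : List (List Int) × Int) (i : Nat) : List (List Int) × Int :=
  if i + 1 = jumps.length then
    (st.1 ++ [[st.2, jumps.getD i 0]], st.2)
  else if jumps.getD (i+1) 0 - jumps.getD i 0 > 0x200 then
    (st.1 ++ [[st.2, jumps.getD i 0]], jumps.getD (i+1) 0)
  else st

def get_jump_regions (jumps : List Int) : List (List Int) :=
  match PySem.List.pyGet? jumps 0 with
  | none => []   -- Python raises IndexError here (excluded by Pre_)
  | some j0 => ((List.range jumps.length).foldl (pvStepA jumps) ([], j0)).1

-- ===== PORT B =====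
-- breaks = [i for i in range(len(jumps)-1) if jumps[i+1] - jumps[i] > 0x200]
def pvBreaks (jumps : List Int) : List Nat :=
  (List.range (jumps.length - 1)).filter (fun i => decide (jumps.getD (i+1) 0 - jumps.getD i 0 > 0x200))

def get_jump_regions_alt (jumps : List Int) : List (List Int) :=
  match jumps with
  | [] => []   -- Python raises IndexError (jumps[0] with s = 0) here (excluded by Pre_)
  | _ :: _ =>
    let breaks := pvBreaks jumps
    let starts := 0 :: breaks.map (· + 1)
    let ends := breaks ++ [jumps.length - 1]
    (starts.zip ends).map (fun se => [jumps.getD se.1 0, jumps.getD se.2 0])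

-- ===== PRECONDITION & SPEC =====
-- A raises IndexError on the empty list (jumps[0]); B does too.
def Pre_get_jump_regions (jumps : List Int) : Prop := jumps ≠ []
instance (jumps : List Int) : Decidable (Pre_get_jump_regions jumps) := by unfold Pre_get_jump_regions; infer_instance
def pvWitness_get_jump_regions : List Int := [0, 10, 2000, 2100]

def Spec_get_jump_regions (jumps : List Int) (out : List (List Int)) : Prop := out = get_jump_regions_alt jumps
instance (jumps : List Int) (out : List (List Int)) : Decidable (Spec_get_jump_regions jumps out) := by unfold Spec_get_jump_regions; infer_instance

-- ===== CLAIM (what is proved, stated in full; the proofs are below) =====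
def Claim_equal_get_jump_regions : Prop := ∀ (jumps : List Int), Dom_get_jump_regions jumps → Pre_get_jump_regions jumps → Spec_get_jump_regions jumps (get_jump_regions jumps)

-- ===== LEMMAS AND PROOFS =====

-- reference recursion both ports are reduced to
def pvGo (l_bound x : Int) (rest : List Int) : List (List Int) :=
  match rest with
  | [] => [[l_bound, x]]
  | y :: ys => if y - x > 0x200 then [l_bound, x] :: pvGo y y ys else pvGo l_bound y ys

-- replace the left bound of the first region
def pvSetL (l : Int) : List (List Int) → List (List Int)
  | [] => []
  | r :: rs => (l :: r.tail) :: rs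

lemma pvSetL_setL (l x : Int) (rs : List (List Int)) : pvSetL l (pvSetL x rs) = pvSetL l rs := by
  cases rs <;> simp [pvSetL]

lemma pvGo_setL (rest : List Int) : ∀ (l x : Int), pvGo l x rest = pvSetL l (pvGo x x rest) := by
  induction rest with
  | nil => intro l x; simp [pvGo, pvSetL]
  | cons y ys ih =>
    intro l x
    by_cases h : y - x > 0x200
    · simp [pvGo, h, pvSetL]
    · simp only [pvGo, if_neg h]
      rw [ih l y, ih x y, pvSetL_setL]

lemma pvA_fold_aux (jumps : List Int) (m : Nat) : ∀ (k : Nat) (regions : List (List Int)) (l_bound : Int),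
    k < jumps.length → jumps.length - (k+1) = m →
    ((List.range' k (jumps.length - k)).foldl (pvStepA jumps) (regions, l_bound)).1
      = regions ++ pvGo l_bound (jumps.getD k 0) (jumps.drop (k+1)) := by
  induction m with
  | zero =>
    intro k regions l_bound hk hm
    have hn : jumps.length = k + 1 := by omega
    have h1 : jumps.length - k = 1 := by omega
    have hdrop : jumps.drop (k+1) = [] := by
      rw [List.drop_eq_nil_iff]; omega
    rw [h1, hdrop]
    simp [List.range', pvStepA, hn, pvGo]
  | succ m ih =>
    intro k regions l_bound hk hm
    have h1 : k + 1 < jumps.length := by omega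
    have hr : jumps.length - k = (jumps.length - (k+1)) + 1 := by omega
    rw [hr, List.range'_succ, List.foldl_cons]
    have hne : ¬ (k + 1 = jumps.length) := by omega
    have hdrop : jumps.drop (k+1) = jumps.getD (k+1) 0 :: jumps.drop (k+2) := by
      rw [List.drop_eq_getElem_cons h1, List.getD_eq_getElem _ _ h1]
    rw [hdrop]
    by_cases hgap : jumps.getD (k+1) 0 - jumps.getD k 0 > 0x200
    · have hstep : pvStepA jumps (regions, l_bound) k
          = (regions ++ [[l_bound, jumps.getD k 0]], jumps.getD (k+1) 0) := by
        unfold pvStepA; rw [if_neg hne, if_pos hgap]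
      rw [hstep, ih (k+1) _ _ h1 (by omega)]
      conv_rhs => rw [pvGo]
      rw [if_pos hgap]
      simp
    · have hstep : pvStepA jumps (regions, l_bound) k = (regions, l_bound) := by
        unfold pvStepA; rw [if_neg hne, if_neg hgap]
      rw [hstep, ih (k+1) _ _ h1 (by omega)]
      conv_rhs => rw [pvGo]
      rw [if_neg hgap]

lemma pvBreaks_cons (x y : Int) (ys : List Int) :
    pvBreaks (x :: y :: ys)
      = (if y - x > 0x200 then [0] else []) ++ (pvBreaks (y :: ys)).map (· + 1) := by
  unfold pvBreaks
  simp only [List.length_cons, Nat.add_sub_cancel]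
  rw [List.range_succ_eq_map, List.filter_cons, List.filter_map]
  have hf : (List.range ys.length).filter
      ((fun i => decide ((x :: y :: ys).getD (i+1) 0 - (x :: y :: ys).getD i 0 > 0x200)) ∘ Nat.succ)
      = (List.range ys.length).filter (fun i => decide ((y :: ys).getD (i+1) 0 - (y :: ys).getD i 0 > 0x200)) := by
    apply List.filter_congr; intro i _; rfl
  rw [hf]
  by_cases h : y - x > 0x200 <;>
    simp [h, List.getD]

-- B computes pvGo
lemma pvB_go (rest : List Int) : ∀ (x : Int), get_jump_regions_alt (x :: rest) = pvGo x x rest := by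
  induction rest with
  | nil =>
    intro x
    rfl
  | cons y ys ih =>
    intro x
    have hget : ∀ k : Nat, (x :: y :: ys).getD (k + 1) 0 = (y :: ys).getD k 0 := by
      intro k; rfl
    show ((0 :: (pvBreaks (x :: y :: ys)).map (· + 1)).zip
            (pvBreaks (x :: y :: ys) ++ [(x :: y :: ys).length - 1])).map
            (fun se => [(x :: y :: ys).getD se.1 0, (x :: y :: ys).getD se.2 0])
        = pvGo x x (y :: ys)
    rw [pvBreaks_cons]
    have hBy : get_jump_regions_alt (y :: ys)
        = ((0 :: (pvBreaks (y :: ys)).map (· + 1)).zip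
            (pvBreaks (y :: ys) ++ [(y :: ys).length - 1])).map
            (fun se => [(y :: ys).getD se.1 0, (y :: ys).getD se.2 0]) := rfl
    have hihy : pvGo y y ys = get_jump_regions_alt (y :: ys) := (ih y).symm
    by_cases hgap : y - x > 0x200
    · rw [if_pos hgap]
      conv_rhs => rw [pvGo]
      rw [if_pos hgap, hihy, hBy]
      show (((0, 0) :: ((1 :: ((pvBreaks (y :: ys)).map (· + 1)).map (· + 1)).zip
              ((pvBreaks (y :: ys)).map (· + 1) ++ [(x :: y :: ys).length - 1]))).map
              (fun se => [(x :: y :: ys).getD se.1 0, (x :: y :: ys).getD se.2 0]))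
          = [x, x] :: _
      rw [List.map_cons]
      congr 1
      have hm : (pvBreaks (y :: ys)).map (· + 1) ++ [(x :: y :: ys).length - 1]
          = ((pvBreaks (y :: ys)) ++ [(y :: ys).length - 1]).map (· + 1) := by
        rw [List.map_append]; simp
      have hh : (1 :: ((pvBreaks (y :: ys)).map (· + 1)).map (· + 1))
          = (0 :: (pvBreaks (y :: ys)).map (· + 1)).map (· + 1) := by simp
      rw [hh, hm, List.zip_map, List.map_map]
      apply List.map_congr_left
      intro se _
      rw [show ((fun se => [(x :: y :: ys).getD se.1 0, (x :: y :: ys).getD se.2 0]) ∘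
                Prod.map (· + 1) (· + 1)) se
            = [(x :: y :: ys).getD (se.1 + 1) 0, (x :: y :: ys).getD (se.2 + 1) 0] from rfl]
      rw [hget se.1, hget se.2]
    · rw [if_neg hgap]
      conv_rhs => rw [pvGo]
      rw [if_neg hgap, pvGo_setL _ x y, hihy, hBy]
      rw [List.nil_append]
      rcases hB : pvBreaks (y :: ys) with _ | ⟨b, bs⟩
      · simp only [List.map_nil, List.nil_append, List.zip_cons_cons, List.zip_nil_right,
          List.map_cons, List.map_nil, pvSetL, List.tail_cons, List.getD_cons_zero]
        rfl
      · simp only [List.map_cons, List.cons_append, List.zip_cons_cons, List.map_cons,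
          pvSetL, List.tail_cons, List.getD_cons_zero, List.getD_cons_succ]
        congr 1
        have hm : bs.map (· + 1) ++ [(x :: y :: ys).length - 1]
            = (bs ++ [(y :: ys).length - 1]).map (· + 1) := by
          rw [List.map_append]; simp
        have hh : ((b + 1 + 1) :: (bs.map (· + 1)).map (· + 1))
            = ((b + 1) :: bs.map (· + 1)).map (· + 1) := by simp
        rw [hm, hh, List.zip_map, List.map_map]
        apply List.map_congr_left
        intro se _
        rw [show ((fun se => [(x :: y :: ys).getD se.1 0, (x :: y :: ys).getD se.2 0]) ∘
                  Prod.map (· + 1) (· + 1)) se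
              = [(x :: y :: ys).getD (se.1 + 1) 0, (x :: y :: ys).getD (se.2 + 1) 0] from rfl]
        rw [hget se.1, hget se.2]

-- ===== VERDICT (by name: the statement is the Claim_ definition above) =====
theorem get_jump_regions_spec : Claim_equal_get_jump_regions := by
  intro jumps _ hpre
  unfold Spec_get_jump_regions
  match jumps, hpre with
  | j0 :: rest, _ =>
    show get_jump_regions (j0 :: rest) = get_jump_regions_alt (j0 :: rest)
    have hA : get_jump_regions (j0 :: rest) = pvGo j0 j0 rest := by
      have h := pvA_fold_aux (j0 :: rest) ((j0 :: rest).length - 1) 0 [] j0 (by simp) rfl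
      simp at h
      simpa [get_jump_regions, PySem.List.pyGet?, PySem.List.pyIdx?, List.range_eq_range'] using h
    rw [hA, pvB_go rest j0]
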